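-- pv_equiv track=rewrite | github.com/bharadwajvyadavalli/coding_patterns | longest_common_subsequence.py | longest_common_substring_k_strings
-- ===== SOURCE A (Python) =====
-- from typing import List, Tuple, Dict, Set
-- from collections import defaultdict
--
-- def longest_common_substring_k_strings(strings: List[str]) -> Tuple[int, str, List[int]]:
--     """
--     Custom Hard - Longest Common Substring of K Strings
--
--     Find longest substring common to all k strings.
--     Return length, substring, and starting positions in each string.
--
--     Algorithm:
--     1. Use suffix array or rolling hash
--     2. Binary search on length
--     3. Check if substring of given length exists in all strings
--
--     Time: O(n * k * log n) where n is max string length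
--     Space: O(n * k)
--
--     Example:
--     strings = ["abcdef", "zabcy", "abcdx"]
--     Output: (3, "abc", [0, 1, 0])
--     """
--     if not strings:
--         return 0, "", []
--
--     def has_common_substring(length: int) -> Tuple[bool, str, List[int]]:
--         """Check if there's a common substring of given length."""
--         if length == 0:
--             return True, "", [0] * len(strings)
--
--         # Get all substrings of given length from first string
--         substrings = defaultdict(list)
--
--         for i in range(len(strings[0]) - length + 1):
--             substr = strings[0][i:i + length]
--             substrings[substr].append(i)
--
--         # Check each substring against other strings
--         for substr, positions in substrings.items():
--             found_positions = [positions[0]]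
--             found_in_all = True
--
--             for j in range(1, len(strings)):
--                 pos = strings[j].find(substr)
--                 if pos == -1:
--                     found_in_all = False
--                     break
--                 found_positions.append(pos)
--
--             if found_in_all:
--                 return True, substr, found_positions
--
--         return False, "", []
--
--     # Binary search on length
--     left, right = 0, min(len(s) for s in strings)
--     result_length = 0
--     result_substring = ""
--     result_positions = []
--
--     while left <= right:
--         mid = (left + right) // 2
--         found, substr, positions = has_common_substring(mid)
--
--         if found:
--             result_length = mid
--             result_substring = substr
--             result_positions = positions
--             left = mid + 1
--         else:
--             right = mid - 1
--
--     return result_length, result_substring, result_positions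
-- ===== SOURCE B (Python) =====
-- def longest_common_substring_k_strings(strings):
--     if not strings:
--         return 0, "", []
--     first, rest = strings[0], strings[1:]
--     for length in range(min(len(s) for s in strings), 0, -1):
--         for i in range(len(first) - length + 1):
--             candidate = first[i:i + length]
--             if all(candidate in s for s in rest):
--                 return length, candidate, [i] + [s.find(candidate) for s in rest]
--     return 0, "", [0] * len(strings)
-- ===== Notes on version B (the rewrite author's own statement) =====
-- stated objective: simpler
-- what changed: Replaces A's binary search on length plus a defaultdict grouping all substring start positions with a single descending scan over candidate lengths that returns at the first (hence longest) common substring; no dict, no inner helper, no binary search.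
import Mathlib
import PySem

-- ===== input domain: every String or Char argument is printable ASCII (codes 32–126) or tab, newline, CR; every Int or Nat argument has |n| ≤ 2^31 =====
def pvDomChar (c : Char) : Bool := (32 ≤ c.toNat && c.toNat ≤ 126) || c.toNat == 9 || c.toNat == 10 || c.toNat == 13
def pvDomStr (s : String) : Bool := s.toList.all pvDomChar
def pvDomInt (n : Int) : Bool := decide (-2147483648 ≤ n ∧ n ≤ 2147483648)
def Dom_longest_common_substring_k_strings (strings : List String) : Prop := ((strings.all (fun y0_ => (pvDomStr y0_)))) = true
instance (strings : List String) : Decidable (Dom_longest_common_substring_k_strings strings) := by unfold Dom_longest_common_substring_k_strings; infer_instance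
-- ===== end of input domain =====

-- B replaces A's binary search on length plus a dict grouping substring start positions by a
-- single descending scan over candidate lengths that returns at the first (hence longest) common
-- substring; same return value on every input (objective: simpler).

-- ===== PORT A =====
def pvA_check (strings : List String) (substr : String) : List Int → List Int → Bool × List Int
  | [], acc => (true, acc)
  | j :: js, acc =>
    let pos := PySem.Str.find (PySem.List.pyGetD strings j "") substr
    if pos = -1 then (false, acc)
    else pvA_check strings substr js (acc ++ [pos])

def pvA_itemsLoop (strings : List String) : List (String × List Int) → Bool × String × List Int
  | [] => (false, "", [])
  | (substr, positions) :: rest =>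
    let r := pvA_check strings substr (PySem.List.pyRange 1 (PySem.List.len strings) 1)
               [PySem.List.pyGetD positions 0 0]
    if r.1 then (true, substr, r.2) else pvA_itemsLoop strings rest

def pvA_hcs (strings : List String) (length : Int) : Bool × String × List Int :=
  if length = 0 then (true, "", List.replicate strings.length (0 : Int))
  else
    let s0 := PySem.List.pyGetD strings 0 ""
    let substrings : PySem.Dict String (List Int) :=
      (PySem.List.pyRange 0 (PySem.Str.len s0 - length + 1) 1).foldl
        (fun d i => d.modify (PySem.Str.slice s0 (some i) (some (i + length))) [] (fun ps => ps ++ [i]))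
        PySem.Dict.empty
    pvA_itemsLoop strings substrings.items

def pvA_bs (strings : List String) (left right : Int) (res : Int × String × List Int) :
    Int × String × List Int :=
  if h : left ≤ right then
    let mid := PySem.Int.floordiv (left + right) 2
    let r := pvA_hcs strings mid
    if r.1 then pvA_bs strings (mid + 1) right (mid, r.2.1, r.2.2)
    else pvA_bs strings left (mid - 1) res
  else res
termination_by (right + 1 - left).toNat
decreasing_by
  · have := PySem.Int.floordiv_two_mid_bounds h; omega
  · have := PySem.Int.floordiv_two_mid_bounds h; omega

def longest_common_substring_k_strings (strings : List String) : Int × String × List Int :=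
  match strings with
  | [] => (0, "", [])
  | _ :: _ =>
    let right := (PySem.List.min? (strings.map (fun s => PySem.Str.len s)) (fun x => x)).getD 0
    pvA_bs strings 0 right (0, "", [])

-- B port
-- ===== PORT B =====
def pvB_inner (first : String) (rest : List String) (length : Int) :
    List Int → Option (Int × String × List Int)
  | [] => none
  | i :: tl =>
    let candidate := PySem.Str.slice first (some i) (some (i + length))
    if rest.all (fun s => PySem.Str.isIn candidate s) then
      some (length, candidate, i :: rest.map (fun s => PySem.Str.find s candidate))
    else pvB_inner first rest length tl

def pvB_outer (strings : List String) (first : String) (rest : List String) :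
    List Int → Int × String × List Int
  | [] => (0, "", List.replicate strings.length (0 : Int))
  | L :: tl =>
    match pvB_inner first rest L (PySem.List.pyRange 0 (PySem.Str.len first - L + 1) 1) with
    | some r => r
    | none => pvB_outer strings first rest tl

def longest_common_substring_k_strings_alt (strings : List String) : Int × String × List Int :=
  match strings with
  | [] => (0, "", [])
  | first :: rest =>
    let minlen := (PySem.List.min? (strings.map (fun s => PySem.Str.len s)) (fun x => x)).getD 0
    pvB_outer strings first rest (PySem.List.pyRange minlen 0 (-1))



-- ===== PRECONDITION & SPEC =====
def Spec_longest_common_substring_k_strings (strings : List String) (out : Int × String × List Int) : Prop := out = longest_common_substring_k_strings_alt strings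
instance (strings : List String) (out : Int × String × List Int) : Decidable (Spec_longest_common_substring_k_strings strings out) := by unfold Spec_longest_common_substring_k_strings; infer_instance

-- ===== CLAIM (what is proved, stated in full; the proofs are below) =====
def Claim_equal_longest_common_substring_k_strings : Prop := ∀ (strings : List String), Dom_longest_common_substring_k_strings strings → Spec_longest_common_substring_k_strings strings (longest_common_substring_k_strings strings)

-- ===== LEMMAS AND PROOFS =====
def pvCand (first : String) (L i : Int) : String := PySem.Str.slice first (some i) (some (i + L))
def pvOk (rest : List String) (c : String) : Bool := rest.all (fun s => PySem.Str.isIn c s)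
def pvIdxs (first : String) (L : Int) : List Int :=
  PySem.List.pyRange 0 (PySem.Str.len first - L + 1) 1
def pvAnsAt (first : String) (rest : List String) (L : Int) : Option (Int × String × List Int) :=
  ((pvIdxs first L).find? (fun i => pvOk rest (pvCand first L i))).map
    (fun i => (L, pvCand first L i, i :: rest.map (fun s => PySem.Str.find s (pvCand first L i))))
def pvAns0 (strings : List String) : Int × String × List Int :=
  (0, "", List.replicate strings.length (0 : Int))
def pvBest (strings : List String) (first : String) (rest : List String) : Nat → Int × String × List Int
  | 0 => pvAns0 strings
  | n + 1 =>
    match pvAnsAt first rest ((n : Int) + 1) with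
    | some r => r
    | none => pvBest strings first rest n

lemma pvB_inner_eq (first : String) (rest : List String) (L : Int) (is : List Int) :
    pvB_inner first rest L is =
      (is.find? (fun i => pvOk rest (pvCand first L i))).map
        (fun i => (L, pvCand first L i, i :: rest.map (fun s => PySem.Str.find s (pvCand first L i)))) := by
  induction is with
  | nil => rfl
  | cons i tl ih =>
    rw [pvB_inner]
    show (if pvOk rest (pvCand first L i) = true then
        some (L, pvCand first L i, i :: rest.map (fun s => PySem.Str.find s (pvCand first L i)))
      else pvB_inner first rest L tl) = _
    cases h : pvOk rest (pvCand first L i) with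
    | true => rw [if_pos rfl, List.find?_cons_of_pos (p := fun i => pvOk rest (pvCand first L i)) (h := h), Option.map_some]
    | false => rw [if_neg (by simp), List.find?_cons_of_neg (p := fun i => pvOk rest (pvCand first L i)) (h := by simp [h]), ih]

lemma isIn_eq_find_ne (c s : String) :
    PySem.Str.isIn c s = !(PySem.Str.find s c == -1) := by
  rcases h : PySem.Str.find s c == -1 with _ | _
  · simp only [beq_eq_false_iff_ne, ne_eq] at h
    simp only [Bool.not_false]
    have := (PySem.Chars.find_ne_neg_one_iff s.toList c.toList).1 (by simpa using h)
    simp [PySem.Chars.isIn_iff_infix, this]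
  · simp only [beq_iff_eq] at h
    simp only [Bool.not_true]
    have := (PySem.Chars.find_eq_neg_one_iff s.toList c.toList).1 (by simpa using h)
    simp only [PySem.Str.isIn_eq]
    rw [← Bool.not_eq_true, PySem.Chars.isIn_iff_infix]
    exact this

lemma js_map (s0 : String) (rest : List String) :
    (PySem.List.pyRange 1 (PySem.List.len (s0 :: rest)) 1).map
        (fun j => PySem.List.pyGetD (s0 :: rest) j "") = rest := by
  rw [PySem.List.len_eq, PySem.List.pyRange_one]
  have h1 : ((((s0 :: rest).length : Int)) - 1).toNat = rest.length := by simp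
  rw [h1, List.map_map]
  apply List.ext_getElem
  · simp
  · intro n h1 h2
    simp only [List.getElem_map, List.getElem_range, Function.comp]
    rw [show ((1 : Int) + (n : Int)) = (((n + 1 : Nat) : Int)) by push_cast; ring]
    rw [PySem.List.pyGetD_natCast]
    simp at h1
    rw [List.getD_eq_getElem _ _ (by simpa using h1)]
    simp

lemma pvA_check_fst (strings : List String) (c : String) (js : List Int) (acc : List Int) :
    (pvA_check strings c js acc).1
      = js.all (fun j => !(PySem.Str.find (PySem.List.pyGetD strings j "") c == -1)) := by
  induction js generalizing acc with
  | nil => rfl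
  | cons j tl ih =>
    simp only [pvA_check, List.all_cons]
    by_cases h : PySem.Str.find (PySem.List.pyGetD strings j "") c = -1
    · rw [if_pos h, h]
      simp
    · rw [if_neg h, ih]
      have hb : (PySem.Str.find (PySem.List.pyGetD strings j "") c == -1) = false := by
        simpa using h
      rw [hb]
      simp

lemma pvA_check_of_all (strings : List String) (c : String) (js : List Int) (acc : List Int)
    (h : ∀ j ∈ js, PySem.Str.find (PySem.List.pyGetD strings j "") c ≠ -1) :
    pvA_check strings c js acc
      = (true, acc ++ js.map (fun j => PySem.Str.find (PySem.List.pyGetD strings j "") c)) := by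
  induction js generalizing acc with
  | nil => simp [pvA_check]
  | cons j tl ih =>
    simp only [pvA_check]
    rw [if_neg (h j (by simp))]
    rw [ih _ (fun j hj => h j (by simp [hj]))]
    simp

lemma check_run_fst (s0 : String) (rest : List String) (c : String) (acc : List Int) :
    (pvA_check (s0 :: rest) c (PySem.List.pyRange 1 (PySem.List.len (s0 :: rest)) 1) acc).1
      = pvOk rest c := by
  rw [pvA_check_fst]
  have h2 : pvOk rest c
      = ((PySem.List.pyRange 1 (PySem.List.len (s0 :: rest)) 1).map
          (fun j => PySem.List.pyGetD (s0 :: rest) j "")).all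
            (fun s => !(PySem.Str.find s c == -1)) := by
    rw [js_map]
    unfold pvOk
    simp only [isIn_eq_find_ne]
  rw [h2, List.all_map]
  simp [Function.comp_def]

lemma check_run_true (s0 : String) (rest : List String) (c : String) (acc : List Int)
    (h : pvOk rest c = true) :
    pvA_check (s0 :: rest) c (PySem.List.pyRange 1 (PySem.List.len (s0 :: rest)) 1) acc
      = (true, acc ++ rest.map (fun s => PySem.Str.find s c)) := by
  have hall : ∀ j ∈ PySem.List.pyRange 1 (PySem.List.len (s0 :: rest)) 1,
      PySem.Str.find (PySem.List.pyGetD (s0 :: rest) j "") c ≠ -1 := by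
    intro j hj
    have hmem : PySem.List.pyGetD (s0 :: rest) j "" ∈ rest := by
      have h0 : PySem.List.pyGetD (s0 :: rest) j "" ∈
          (PySem.List.pyRange 1 (PySem.List.len (s0 :: rest)) 1).map
            (fun j => PySem.List.pyGetD (s0 :: rest) j "") :=
        List.mem_map_of_mem hj
      rwa [js_map] at h0
    have := (by simpa [pvOk, List.all_eq_true] using h : ∀ s ∈ rest, PySem.Str.isIn c s = true)
    have hin := this _ hmem
    rw [isIn_eq_find_ne] at hin
    simpa using hin
  rw [pvA_check_of_all _ _ _ _ hall]
  congr 2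
  have h2 : rest.map (fun s => PySem.Str.find s c)
      = ((PySem.List.pyRange 1 (PySem.List.len (s0 :: rest)) 1).map
          (fun j => PySem.List.pyGetD (s0 :: rest) j "")).map
            (fun s => PySem.Str.find s c) := by rw [js_map]
  rw [h2, List.map_map]
  simp [Function.comp_def]

lemma find?_discard (s : List String) (p : String → Bool) (y : String) (hy : p y = false) :
    (PySem.Set.discard s y).find? p = s.find? p := by
  induction s with
  | nil => rfl
  | cons x tl ih =>
    simp only [PySem.Set.discard] at ih ⊢
    rw [List.filter_cons]
    by_cases hxy : (x == y)
    · simp only [hxy, Bool.not_true, if_neg Bool.false_ne_true]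
      have hx : x = y := by simpa using hxy
      rw [ih, List.find?_cons_of_neg (h := by simp [hx, hy])]
    · simp only [hxy, Bool.not_false, if_true]
      rcases hpx : p x with _ | _
      · rw [List.find?_cons_of_neg (h := by simp [hpx]), List.find?_cons_of_neg (h := by simp [hpx]), ih]
      · rw [List.find?_cons_of_pos (h := hpx), List.find?_cons_of_pos (h := hpx)]

lemma dict_items (l : List Int) (f : Int → String) :
    (l.foldl (fun d i => d.modify (f i) [] (fun ps => ps ++ [i]))
        (PySem.Dict.empty : PySem.Dict String (List Int))).items
      = (PySem.Set.ofList (l.map f)).map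
          (fun c => (c, l.filter (fun i => f i == c))) := by
  set d := l.foldl (fun d i => d.modify (f i) [] (fun ps => ps ++ [i])) (PySem.Dict.empty : PySem.Dict String (List Int)) with hd
  have hkeys : d.keys = PySem.Set.ofList (l.map f) := by
    rw [hd, PySem.Dict.keys_foldl_modify_key]
    simp [PySem.Dict.keys_empty, PySem.Set.update_nil_left]
  have hnodup : d.keys.Nodup := by
    rw [hkeys]; exact PySem.Set.nodup_ofList _
  have hget : ∀ c, d.getD c [] = l.filter (fun i => f i == c) := by
    intro c
    have hfold : (l.map (fun i => (f i, (i : Int)))).foldl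
        (fun d p => d.modify p.1 [] (fun ps => ps ++ [p.2]))
        (PySem.Dict.empty : PySem.Dict String (List Int))
        = d := by rw [List.foldl_map, hd]
    rw [← hfold, PySem.Dict.getD_foldl_modify_append]
    rw [PySem.Dict.getD_empty, List.nil_append]
    rw [List.filter_map (p := fun p => p.1 == c) (f := fun i => (f i, (i : Int)))]
    rw [List.map_map]
    simp [Function.comp_def]
  rw [PySem.Dict.items_eq_map_keys d hnodup []]
  rw [hkeys]
  apply List.map_congr_left
  intro c hc
  rw [hget]

lemma find?_ofList (l : List Int) (f : Int → String) (p : String → Bool) :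
    (PySem.Set.ofList (l.map f)).find? p = (l.find? (fun x => p (f x))).map f := by
  induction l with
  | nil => rfl
  | cons x tl ih =>
    rw [List.map_cons, PySem.Set.ofList_cons]
    rcases h : p (f x) with _ | _
    · rw [List.find?_cons_of_neg (h := by simp [h]),
          List.find?_cons_of_neg (h := by simp [h]),
          find?_discard _ _ _ h, ih]
    · rw [List.find?_cons_of_pos (h := h), List.find?_cons_of_pos (p := fun x => p (f x)) (h := h), Option.map_some]

lemma filter_head (l : List Int) (p : String → Bool) (f : Int → String) (i0 : Int)
    (h : l.find? (fun i => p (f i)) = some i0) :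
    (l.filter (fun i => f i == f i0)).getD 0 0 = i0 := by
  have hp0 : p (f i0) = true := by
    have := List.find?_some h
    simpa using this
  induction l with
  | nil => simp at h
  | cons x tl ih =>
    rcases hx : p (f x) with _ | _
    · rw [List.find?_cons_of_neg (p := fun i => p (f i)) (h := by simp [hx])] at h
      have hne : ¬ (f x == f i0) := by
        intro hc
        have : f x = f i0 := by simpa using hc
        rw [this, hp0] at hx; simp at hx
      rw [List.filter_cons, if_neg (by simpa using hne)]
      exact ih h
    · rw [List.find?_cons_of_pos (p := fun i => p (f i)) (h := hx)] at h
      have : x = i0 := by simpa using h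
      subst this
      rw [List.filter_cons, if_pos (by simp)]
      simp

lemma itemsLoop_eq (s0 : String) (rest : List String) (l : List Int) (f : Int → String)
    (cs : List String) :
    pvA_itemsLoop (s0 :: rest) (cs.map (fun c => (c, l.filter (fun i => f i == c))))
      = match cs.find? (pvOk rest) with
        | some c => (true, c,
            PySem.List.pyGetD (l.filter (fun i => f i == c)) 0 0
              :: rest.map (fun s => PySem.Str.find s c))
        | none => (false, "", []) := by
  induction cs with
  | nil => rfl
  | cons c cs' ih =>
    rw [List.map_cons]
    rw [pvA_itemsLoop]
    rcases h : pvOk rest c with _ | _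
    · rw [if_neg (by rw [check_run_fst, h]; simp), ih,
          List.find?_cons_of_neg (p := pvOk rest) (h := by simp [h])]
    · rw [List.find?_cons_of_pos (p := pvOk rest) (h := h)]
      have hc := check_run_true s0 rest c
        [PySem.List.pyGetD (l.filter (fun i => f i == c)) 0 0] h
      rw [if_pos (by rw [check_run_fst, h])]
      rw [hc]
      simp

lemma hcs_eq (s0 : String) (rest : List String) (L : Int) (hL : L ≠ 0) :
    pvA_hcs (s0 :: rest) L
      = match pvAnsAt s0 rest L with
        | some r => (true, r.2.1, r.2.2)
        | none => (false, "", []) := by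
  rw [pvA_hcs, if_neg hL]
  simp only [PySem.List.pyGetD_zero_cons]
  show pvA_itemsLoop (s0 :: rest)
      (((pvIdxs s0 L).foldl
        (fun d i => d.modify (pvCand s0 L i) [] (fun ps => ps ++ [i]))
        (PySem.Dict.empty : PySem.Dict String (List Int))).items) = _
  rw [dict_items (pvIdxs s0 L) (pvCand s0 L)]
  rw [itemsLoop_eq s0 rest (pvIdxs s0 L) (pvCand s0 L)]
  rw [find?_ofList (pvIdxs s0 L) (pvCand s0 L) (pvOk rest)]
  unfold pvAnsAt
  cases hf : (pvIdxs s0 L).find? (fun i => pvOk rest (pvCand s0 L i)) with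
  | none => simp
  | some i0 =>
    simp only [Option.map_some]
    have hh := filter_head (pvIdxs s0 L) (pvOk rest) (pvCand s0 L) i0 hf
    rw [PySem.List.pyGetD_zero]
    rw [hh]

lemma cand_toList (s0 : String) (L i : Int) (hi : 0 ≤ i) (hL : 0 ≤ L) :
    (pvCand s0 L i).toList = (s0.toList.drop i.toNat).take L.toNat := by
  unfold pvCand
  rw [show (PySem.Str.slice s0 (some i) (some (i + L))).toList
      = PySem.List.slice s0.toList (some i) (some (i + L)) from by
    simp [PySem.Str.slice]]
  rw [PySem.List.slice_toNat _ hi (by omega)]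
  congr 1
  omega

lemma ansAt_mono (s0 : String) (rest : List String) (L1 L2 : Int) (h0 : 0 ≤ L1) (h12 : L1 ≤ L2)
    (h : (pvAnsAt s0 rest L2).isSome) : (pvAnsAt s0 rest L1).isSome := by
  unfold pvAnsAt at h ⊢
  rw [Option.isSome_map] at h ⊢
  rw [List.find?_isSome] at h ⊢
  obtain ⟨i, hmem, hok⟩ := h
  refine ⟨i, ?_, ?_⟩
  · unfold pvIdxs at hmem ⊢
    rw [PySem.List.mem_pyRange_one] at hmem ⊢
    omega
  · have hi : 0 ≤ i := by
      unfold pvIdxs at hmem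
      rw [PySem.List.mem_pyRange_one] at hmem; omega
    simp only [pvOk, List.all_eq_true] at hok ⊢
    intro s hs
    have h2 := hok s hs
    rw [PySem.Str.isIn_iff_infix] at h2 ⊢
    have hpre : (pvCand s0 L1 i).toList <+: (pvCand s0 L2 i).toList := by
      rw [cand_toList _ _ _ hi h0, cand_toList _ _ _ hi (by omega)]
      exact List.take_prefix_take_left (by omega)
    exact hpre.isInfix.trans h2

lemma pvB_outer_eq (strings : List String) (first : String) (rest : List String) (n : Nat) :
    pvB_outer strings first rest (PySem.List.pyRange (n : Int) 0 (-1))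
      = pvBest strings first rest n := by
  induction n with
  | zero => rw [PySem.List.pyRange_neg_one_eq_nil (by omega)]; rfl
  | succ m ih =>
    rw [PySem.List.pyRange_neg_one_cons (by push_cast; omega)]
    rw [pvB_outer]
    rw [pvB_inner_eq]
    rw [show (((m + 1 : Nat) : Int)) = ((m : Int) + 1) by push_cast; ring,
        show (((m : Int) + 1) - 1) = ((m : Int)) by ring]
    show (match pvAnsAt first rest ((m : Int) + 1) with
      | some r => r
      | none => pvB_outer strings first rest (PySem.List.pyRange (m : Int) 0 (-1))) = _
    rw [pvBest]
    cases hf : pvAnsAt first rest ((m : Int) + 1) with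
    | none => simpa using ih
    | some r => simp

lemma best_skip (strings : List String) (s0 : String) (rest : List String) (n m : Nat)
    (hmn : m ≤ n) (h : ∀ L : Nat, m < L → L ≤ n → pvAnsAt s0 rest (L : Int) = none) :
    pvBest strings s0 rest n = pvBest strings s0 rest m := by
  induction n with
  | zero => rw [Nat.le_zero.mp hmn]
  | succ k ih =>
    rcases Nat.eq_or_lt_of_le hmn with he | hlt
    · rw [he]
    · have hnone := h (k + 1) (by omega) (by omega)
      rw [pvBest]
      rw [show ((k : Int) + 1) = ((k + 1 : Nat) : Int) by push_cast; ring, hnone]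
      exact ih (by omega) (fun L h1 h2 => h L h1 (by omega))

lemma ansAt_fst (s0 : String) (rest : List String) (L : Int) (r : Int × String × List Int)
    (h : pvAnsAt s0 rest L = some r) : r.1 = L := by
  unfold pvAnsAt at h
  cases hf : (pvIdxs s0 L).find? (fun i => pvOk rest (pvCand s0 L i)) with
  | none => rw [hf] at h; simp at h
  | some i => rw [hf] at h; simp at h; simp [← h]

lemma bs_eq (s0 : String) (rest : List String) (ml : Int) (hml : 0 ≤ ml)
    (left right : Int) (res : Int × String × List Int)
    (h1 : 0 ≤ left) (h2 : left ≤ right + 1) (h3 : right ≤ ml)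
    (h4 : 1 ≤ left ∨ 0 ≤ right)
    (h5 : ∀ L : Int, right < L → L ≤ ml → pvAnsAt s0 rest L = none)
    (h6 : 1 ≤ left →
      ((left - 1 = 0 ∧ res = pvAns0 (s0 :: rest)) ∨
        (1 ≤ left - 1 ∧ ∃ r, pvAnsAt s0 rest (left - 1) = some r ∧ res = r))) :
    pvA_bs (s0 :: rest) left right res = pvBest (s0 :: rest) s0 rest ml.toNat := by
  rw [pvA_bs]
  by_cases hlr : left ≤ right
  · rw [dif_pos hlr]
    have hb := PySem.Int.floordiv_two_mid_bounds hlr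
    show (if (pvA_hcs (s0 :: rest) (PySem.Int.floordiv (left + right) 2)).1 = true then
        pvA_bs (s0 :: rest) (PySem.Int.floordiv (left + right) 2 + 1) right
          (PySem.Int.floordiv (left + right) 2,
            (pvA_hcs (s0 :: rest) (PySem.Int.floordiv (left + right) 2)).2.1,
            (pvA_hcs (s0 :: rest) (PySem.Int.floordiv (left + right) 2)).2.2)
      else pvA_bs (s0 :: rest) left (PySem.Int.floordiv (left + right) 2 - 1) res) = _
    set mid := PySem.Int.floordiv (left + right) 2 with hmid
    by_cases hm0 : mid = 0
    · -- mid = 0: hcs returns the trivial (true, "", zeros)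
      have hh : pvA_hcs (s0 :: rest) mid = (true, "", List.replicate (s0 :: rest).length 0) := by
        rw [hm0, pvA_hcs, if_pos rfl]
      rw [hh, if_pos rfl]
      exact bs_eq s0 rest ml hml (mid + 1) right (mid, "", List.replicate (s0 :: rest).length 0)
        (by omega) (by omega) h3 (by omega) h5
        (fun _ => Or.inl ⟨by omega, by rw [hm0]; rfl⟩)
    · -- mid ≥ 1
      have hm1 : 1 ≤ mid := by omega
      rw [hcs_eq s0 rest mid (by omega)]
      cases ha : pvAnsAt s0 rest mid with
      | some r =>
        simp only []
        rw [if_pos trivial]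
        have hr1 : r.1 = mid := ansAt_fst s0 rest mid r ha
        have hres : ((mid : Int), r.2.1, r.2.2) = r := by
          rw [← hr1]
        rw [hres]
        exact bs_eq s0 rest ml hml (mid + 1) right r
          (by omega) (by omega) h3 (by omega) h5
          (fun _ => Or.inr ⟨by omega, r, by simpa using ha, rfl⟩)
      | none =>
        simp only []
        rw [if_neg (by simp)]
        refine bs_eq s0 rest ml hml left (mid - 1) res
          (by omega) (by omega) (by omega) (by omega) ?_ h6
        intro L hL1 hL2
        by_cases hLm : mid ≤ L
        · cases hLs : pvAnsAt s0 rest L with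
          | none => rfl
          | some r2 =>
            exfalso
            have := ansAt_mono s0 rest mid L (by omega) hLm (by rw [hLs]; rfl)
            rw [ha] at this
            simp at this
        · exact h5 L (by omega) hL2
  · rw [dif_neg hlr]
    have hleft : left = right + 1 := by omega
    have hl1 : 1 ≤ left := by omega
    rcases h6 hl1 with ⟨hz, hres⟩ | ⟨hge, r, har, hres⟩
    · -- left - 1 = 0, res = ans0
      have : pvBest (s0 :: rest) s0 rest ml.toNat = pvBest (s0 :: rest) s0 rest 0 := by
        apply best_skip _ _ _ _ _ (by omega)
        intro L hL1 hL2
        exact h5 (L : Int) (by omega) (by omega)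
      rw [this, hres]
      rfl
    · -- 1 ≤ left - 1, ansAt (left-1) = some r
      have hstep : pvBest (s0 :: rest) s0 rest ml.toNat
          = pvBest (s0 :: rest) s0 rest (left - 1).toNat := by
        apply best_skip _ _ _ _ _ (by omega)
        intro L hL1 hL2
        exact h5 (L : Int) (by omega) (by omega)
      rw [hstep, hres]
      obtain ⟨k, hk⟩ : ∃ k : Nat, (left - 1).toNat = k + 1 := ⟨(left - 2).toNat, by omega⟩
      rw [hk, pvBest]
      rw [show ((k : Int) + 1) = left - 1 by omega, har]
termination_by (right + 1 - left).toNat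
decreasing_by
  all_goals omega

theorem main_eq (strings : List String) :
    longest_common_substring_k_strings strings = longest_common_substring_k_strings_alt strings := by
  cases strings with
  | nil => rfl
  | cons s0 rest =>
    rw [longest_common_substring_k_strings, longest_common_substring_k_strings_alt]
    have hml : 0 ≤ (PySem.List.min? ((s0 :: rest).map (fun s => PySem.Str.len s)) (fun x => x)).getD 0 := by
      cases hm : PySem.List.min? ((s0 :: rest).map (fun s => PySem.Str.len s)) (fun x => x) with
      | none => simp
      | some m =>
        have hmem := PySem.List.min?_mem hm
        obtain ⟨s, hs, hlen⟩ := List.mem_map.mp hmem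
        simp only [Option.getD_some]
        rw [← hlen, PySem.Str.len_eq]
        positivity
    set ml := (PySem.List.min? ((s0 :: rest).map (fun s => PySem.Str.len s)) (fun x => x)).getD 0 with hmldef
    show pvA_bs (s0 :: rest) 0 ml (0, "", [])
      = pvB_outer (s0 :: rest) s0 rest (PySem.List.pyRange ml 0 (-1))
    rw [bs_eq s0 rest ml hml 0 ml (0, "", []) (by omega) (by omega) (by omega)
        (Or.inr hml) (fun L h1 h2 => by omega) (fun h => by omega)]
    have hcast : pvB_outer (s0 :: rest) s0 rest (PySem.List.pyRange ml 0 (-1))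
        = pvBest (s0 :: rest) s0 rest ml.toNat := by
      rw [show ml = ((ml.toNat : Nat) : Int) from (Int.toNat_of_nonneg hml).symm, pvB_outer_eq]
      congr 1
    rw [hcast]

-- ===== VERDICT (by name: the statement is the Claim_ definition above) =====
theorem longest_common_substring_k_strings_spec : Claim_equal_longest_common_substring_k_strings := by
  intro strings _
  unfold Spec_longest_common_substring_k_strings
  exact main_eq strings
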